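-- pv_equiv track=rewrite | github.com/samkoen/Stam_FE_BE | StamStam-BE/BE_Model_Cursor/comparison/space_comparator.py | _map_ref_char_to_det_char
-- ===== SOURCE A (Python) =====
-- def _map_ref_char_to_det_char(ref_char_idx, char_diff):
--     """
--     Mappe une position de lettre dans ref_chars_only vers det_chars_only
--     en utilisant le diff.
--
--     Args:
--         ref_char_idx: Index dans ref_chars_only
--         char_diff: Diff entre ref_chars_only et det_chars_only
--
--     Returns:
--         int ou None: Index correspondant dans det_chars_only, ou None si non trouvé
--     """
--     ref_pos = 0
--     det_pos = 0
--
--     for op, text in char_diff: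
--         if op == 0:  # Égalité
--             # Les deux textes ont les mêmes caractères
--             if ref_pos <= ref_char_idx < ref_pos + len(text):
--                 # La lettre recherchée est dans cette section
--                 offset = ref_char_idx - ref_pos
--                 return det_pos + offset
--             ref_pos += len(text)
--             det_pos += len(text)
--         elif op == -1:  # Manquant dans détecté
--             # Caractères dans la référence mais pas dans le détecté
--             # Si la lettre recherchée est dans cette section manquante,
--             # on ne peut pas la mapper directement
--             if ref_pos <= ref_char_idx < ref_pos + len(text):
--                 # La lettre est manquante dans le détecté
--                 # On retourne None car on ne peut pas mapper
--                 return None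
--             ref_pos += len(text)
--         elif op == 1:  # En trop dans détecté
--             # Caractères dans le détecté mais pas dans la référence
--             # On avance seulement dans det_pos
--             det_pos += len(text)
--
--     return None
-- ===== SOURCE B (Python) =====
-- def _map_ref_char_to_det_char(ref_char_idx, char_diff):
--     """Build the full ref->det index table once, then answer by a guarded lookup."""
--     table = []
--     det_pos = 0
--     for op, text in char_diff:
--         n = len(text)
--         if op == 0:
--             table.extend(range(det_pos, det_pos + n))
--             det_pos += n
--         elif op == -1:
--             table.extend([None] * n)
--         elif op == 1:
--             det_pos += n
--     if 0 <= ref_char_idx < len(table):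
--         return table[ref_char_idx]
--     return None
-- ===== Notes on version B (the rewrite author's own statement) =====
-- stated objective: alternative
-- what changed: B replaces A's scan-with-early-return (tracking ref_pos/det_pos and answering mid-loop) by first materializing the complete ref-index -> det-index table from the diff and then answering with a single bounds-guarded lookup.
import Mathlib
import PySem

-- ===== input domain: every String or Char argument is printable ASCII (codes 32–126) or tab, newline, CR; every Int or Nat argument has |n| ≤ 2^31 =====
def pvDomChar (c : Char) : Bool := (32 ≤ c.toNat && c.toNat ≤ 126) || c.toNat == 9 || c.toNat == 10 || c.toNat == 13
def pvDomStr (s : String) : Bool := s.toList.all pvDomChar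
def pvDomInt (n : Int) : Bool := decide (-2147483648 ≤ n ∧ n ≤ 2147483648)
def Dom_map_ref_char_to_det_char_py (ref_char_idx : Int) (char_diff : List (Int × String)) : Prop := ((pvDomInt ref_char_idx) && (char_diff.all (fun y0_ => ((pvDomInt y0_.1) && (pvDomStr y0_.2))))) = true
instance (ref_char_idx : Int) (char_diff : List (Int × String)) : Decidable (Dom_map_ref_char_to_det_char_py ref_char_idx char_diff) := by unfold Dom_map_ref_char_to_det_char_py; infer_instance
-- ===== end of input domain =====

-- B builds the complete ref->det index table once and answers by a guarded lookup,
-- instead of A's positional scan with early return (alternative decomposition, same cost).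


-- ===== PORT A =====
-- A's for-loop over char_diff carrying (ref_pos, det_pos), returning from inside the loop.
def pvLoopA (ref_char_idx : Int) : List (Int × String) → Int → Int → Option Int
  | [], _, _ => none
  | (op, text) :: rest, ref_pos, det_pos =>
    if op = 0 then
      if ref_pos ≤ ref_char_idx ∧ ref_char_idx < ref_pos + PySem.Str.len text then
        some (det_pos + (ref_char_idx - ref_pos))
      else
        pvLoopA ref_char_idx rest (ref_pos + PySem.Str.len text) (det_pos + PySem.Str.len text)
    else if op = -1 then
      if ref_pos ≤ ref_char_idx ∧ ref_char_idx < ref_pos + PySem.Str.len text then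
        none
      else
        pvLoopA ref_char_idx rest (ref_pos + PySem.Str.len text) det_pos
    else if op = 1 then
      pvLoopA ref_char_idx rest ref_pos (det_pos + PySem.Str.len text)
    else
      pvLoopA ref_char_idx rest ref_pos det_pos

def map_ref_char_to_det_char_py (ref_char_idx : Int) (char_diff : List (Int × String)) : Option Int :=
  pvLoopA ref_char_idx char_diff 0 0

-- ===== PORT B =====
-- B's table-building loop: one Option Int entry per reference character.
def pvBuild : List (Int × String) → Int → List (Option Int)
  | [], _ => []
  | (op, text) :: rest, det_pos =>
    if op = 0 then
      (PySem.List.pyRange det_pos (det_pos + PySem.Str.len text) 1).map some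
        ++ pvBuild rest (det_pos + PySem.Str.len text)
    else if op = -1 then
      List.replicate (PySem.Str.len text).toNat none ++ pvBuild rest det_pos
    else if op = 1 then
      pvBuild rest (det_pos + PySem.Str.len text)
    else
      pvBuild rest det_pos

def map_ref_char_to_det_char_py_alt (ref_char_idx : Int) (char_diff : List (Int × String)) : Option Int :=
  let table := pvBuild char_diff 0
  if 0 ≤ ref_char_idx ∧ ref_char_idx < (table.length : Int) then
    table.getD ref_char_idx.toNat none
  else
    none

-- ===== PRECONDITION & SPEC =====
def Spec_map_ref_char_to_det_char_py (ref_char_idx : Int) (char_diff : List (Int × String)) (out : Option Int) : Prop := out = map_ref_char_to_det_char_py_alt ref_char_idx char_diff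
instance (ref_char_idx : Int) (char_diff : List (Int × String)) (out : Option Int) : Decidable (Spec_map_ref_char_to_det_char_py ref_char_idx char_diff out) := by unfold Spec_map_ref_char_to_det_char_py; infer_instance

-- ===== CLAIM (what is proved, stated in full; the proofs are below) =====
def Claim_equal_map_ref_char_to_det_char_py : Prop := ∀ (ref_char_idx : Int) (char_diff : List (Int × String)), Dom_map_ref_char_to_det_char_py ref_char_idx char_diff → Spec_map_ref_char_to_det_char_py ref_char_idx char_diff (map_ref_char_to_det_char_py ref_char_idx char_diff)

-- ===== LEMMAS AND PROOFS =====

-- Guarded lookup, as performed at the end of B (proof-side abbreviation).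
def pvLookup (t : List (Option Int)) (j : Int) : Option Int :=
  if 0 ≤ j ∧ j < (t.length : Int) then t.getD j.toNat none else none

lemma pvAlt_eq_lookup (ref_char_idx : Int) (char_diff : List (Int × String)) :
    map_ref_char_to_det_char_py_alt ref_char_idx char_diff
      = pvLookup (pvBuild char_diff 0) ref_char_idx := rfl

lemma pvLookup_append (xs ys : List (Option Int)) (j : Int) :
    pvLookup (xs ++ ys) j
      = if 0 ≤ j ∧ j < (xs.length : Int) then pvLookup xs j
        else pvLookup ys (j - xs.length) := by
  unfold pvLookup
  by_cases hx : 0 ≤ j ∧ j < (xs.length : Int)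
  · rw [if_pos hx, if_pos hx,
      if_pos (show 0 ≤ j ∧ j < ((xs ++ ys).length : Int) by
        rw [List.length_append]; push_cast; omega)]
    have hj : j.toNat < xs.length := by omega
    exact List.getD_append xs ys none j.toNat hj
  · rw [if_neg hx]
    by_cases hy : 0 ≤ j - (xs.length : Int) ∧ j - (xs.length : Int) < (ys.length : Int)
    · rw [if_pos hy,
        if_pos (show 0 ≤ j ∧ j < ((xs ++ ys).length : Int) by
          rw [List.length_append]; push_cast; omega)]
      have hge : xs.length ≤ j.toNat := by omega
      have hsub : j.toNat - xs.length = (j - (xs.length : Int)).toNat := by omega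
      rw [List.getD_append_right xs ys none j.toNat hge, hsub]
    · rw [if_neg hy,
        if_neg (show ¬ (0 ≤ j ∧ j < ((xs ++ ys).length : Int)) by
          rw [List.length_append]; push_cast; omega)]

lemma pvLookup_range_map (d n j : Int) (h0 : 0 ≤ j) (h1 : j < n) :
    pvLookup ((PySem.List.pyRange d (d + n) 1).map some) j = some (d + j) := by
  unfold pvLookup
  have hlen : ((PySem.List.pyRange d (d + n) 1).map some).length = n.toNat := by
    simp [pysem]
  rw [hlen, if_pos (show 0 ≤ j ∧ j < ((n.toNat : Nat) : Int) by omega)]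
  have hk : j.toNat < ((d + n) - d).toNat := by omega
  have h := PySem.List.pyGetD_map_pyRange_one some d (d + n) j.toNat none hk
  rw [PySem.List.pyGetD_natCast] at h
  rw [h]
  congr 1
  omega

lemma pvLookup_replicate (m : Nat) (j : Int) :
    pvLookup (List.replicate m none) j = none := by
  unfold pvLookup
  split_ifs with h
  · simp [List.getD]
  · rfl

lemma pvLoopA_eq_lookup (ref_char_idx : Int) (char_diff : List (Int × String)) :
    ∀ (ref_pos det_pos : Int),
      pvLoopA ref_char_idx char_diff ref_pos det_pos
        = pvLookup (pvBuild char_diff det_pos) (ref_char_idx - ref_pos) := by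
  induction char_diff with
  | nil => intro rp dp; simp [pvLoopA, pvBuild, pvLookup]
  | cons hd tl ih =>
    intro rp dp
    obtain ⟨op, text⟩ := hd
    have hn : 0 ≤ PySem.Str.len text := by
      simp [PySem.Str.len_eq]
    by_cases h0 : op = 0
    · simp only [pvLoopA, pvBuild, if_pos h0]
      rw [pvLookup_append]
      have hlen : ((PySem.List.pyRange dp (dp + PySem.Str.len text) 1).map some).length
          = (PySem.Str.len text).toNat := by simp [pysem]
      by_cases hin : rp ≤ ref_char_idx ∧ ref_char_idx < rp + PySem.Str.len text
      · rw [if_pos hin, if_pos (by rw [hlen]; omega)]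
        rw [pvLookup_range_map dp (PySem.Str.len text) (ref_char_idx - rp) (by omega) (by omega)]
      · rw [if_neg hin, if_neg (by rw [hlen]; omega), ih]
        congr 1; rw [hlen]; omega
    · by_cases h1 : op = -1
      · simp only [pvLoopA, pvBuild, if_neg h0, if_pos h1]
        rw [pvLookup_append]
        have hlen : (List.replicate (PySem.Str.len text).toNat (none : Option Int)).length
            = (PySem.Str.len text).toNat := by simp
        by_cases hin : rp ≤ ref_char_idx ∧ ref_char_idx < rp + PySem.Str.len text
        · rw [if_pos hin, if_pos (by rw [hlen]; omega)]
          exact (pvLookup_replicate _ _).symm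
        · rw [if_neg hin, if_neg (by rw [hlen]; omega), ih]
          congr 1; rw [hlen]; omega
      · by_cases h2 : op = 1
        · simp only [pvLoopA, pvBuild, if_neg h0, if_neg h1, if_pos h2]
          exact ih rp (dp + PySem.Str.len text)
        · simp only [pvLoopA, pvBuild, if_neg h0, if_neg h1, if_neg h2]
          exact ih rp dp

-- ===== VERDICT (by name: the statement is the Claim_ definition above) =====
theorem map_ref_char_to_det_char_py_spec : Claim_equal_map_ref_char_to_det_char_py := by
  intro ref_char_idx char_diff _
  unfold Spec_map_ref_char_to_det_char_py map_ref_char_to_det_char_py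
  rw [pvAlt_eq_lookup, pvLoopA_eq_lookup ref_char_idx char_diff 0 0]
  norm_num
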